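-- pv_equiv track=rewrite | github.com/sagitaurus25/SevaAI | Older files/lambda_s3_service_move.py | extract_bucket_name
-- ===== SOURCE A (Python) =====
-- def extract_bucket_name(request):
--     """Extract bucket name from natural language request"""
--     words = request.split()
--
--     # Handle "Create a new bucket called bucket-name" pattern
--     if 'called' in words:
--         called_index = words.index('called')
--         if called_index + 1 < len(words):
--             return words[called_index + 1]
--
--     # Handle "bucket bucket-name" pattern
--     for i, word in enumerate(words):
--         if word == 'bucket' and i + 1 < len(words):
--             next_word = words[i + 1]
--             if next_word != 'called':  # Skip if it's "bucket called"
--                 return next_word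
--
--     # Look for words with hyphens (likely bucket names)
--     for word in words:
--         if '-' in word and len(word) > 10:  # Bucket names are usually longer
--             return word
--
--     return None
-- ===== SOURCE B (Python) =====
-- def extract_bucket_name(request):
--     """Extract bucket name from natural language request (single pass)."""
--     words = request.split()
--     n = len(words)
--     called_c = bucket_c = hyphen_c = None
--     for i, word in enumerate(words):
--         if called_c is None and word == 'called' and i + 1 < n:
--             called_c = words[i + 1]
--         if bucket_c is None and word == 'bucket' and i + 1 < n and words[i + 1] != 'called':
--             bucket_c = words[i + 1]
--         if hyphen_c is None and '-' in word and len(word) > 10: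
--             hyphen_c = word
--     if called_c is not None:
--         return called_c
--     if bucket_c is not None:
--         return bucket_c
--     return hyphen_c
-- ===== Notes on version B (the rewrite author's own statement) =====
-- stated objective: alternative
-- what changed: A's three sequential scans (index-based 'called' lookup, enumerate loop for 'bucket', hyphen loop) are merged into one single pass that records the first match of each pattern in three set-once candidate variables and applies the priority order after the loop.
import Mathlib
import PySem

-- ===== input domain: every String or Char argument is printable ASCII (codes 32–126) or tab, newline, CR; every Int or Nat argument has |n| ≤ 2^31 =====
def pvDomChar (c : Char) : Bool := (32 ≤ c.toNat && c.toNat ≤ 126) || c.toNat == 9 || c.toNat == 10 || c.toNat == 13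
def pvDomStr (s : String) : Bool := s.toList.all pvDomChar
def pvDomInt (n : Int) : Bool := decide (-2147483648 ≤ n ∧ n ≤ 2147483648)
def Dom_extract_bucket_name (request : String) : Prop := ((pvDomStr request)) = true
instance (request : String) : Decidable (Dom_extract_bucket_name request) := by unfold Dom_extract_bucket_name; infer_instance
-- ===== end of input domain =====

-- B replaces A's three sequential scans by one pass that records the first match of
-- each pattern in three set-once candidates and applies the priority order afterwards
-- (objective: alternative decomposition; same asymptotic cost).

-- ===== PORT A =====
-- for i, word in enumerate(words): ... (second pattern)
def pvA_bucketLoop (words : List String) : List (Int × String) → Option String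
  | [] => none
  | (i, word) :: rest =>
    if word = "bucket" ∧ i + 1 < PySem.List.len words then
      let next_word := PySem.List.pyGetD words (i + 1) ""
      if next_word ≠ "called" then some next_word else pvA_bucketLoop words rest
    else pvA_bucketLoop words rest

-- for word in words: ... (third pattern)
def pvA_hyphenLoop : List String → Option String
  | [] => none
  | word :: rest =>
    if PySem.Str.isIn "-" word = true ∧ PySem.Str.len word > 10 then some word
    else pvA_hyphenLoop rest

def extract_bucket_name (request : String) : Option String :=
  let words := PySem.Str.split₀ request
  let rest :=
    match pvA_bucketLoop words (PySem.List.enumerate words 0) with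
    | some w => some w
    | none => pvA_hyphenLoop words
  if "called" ∈ words then
    match PySem.List.index? words "called" with
    | some ci =>
      if (ci : Int) + 1 < PySem.List.len words then
        some (PySem.List.pyGetD words ((ci : Int) + 1) "")
      else rest
    | none => rest
  else rest

-- ===== PORT B =====
-- one fold step updating the three set-once candidates (called, bucket, hyphen)
def pvB_step (words : List String) (n : Int)
    (s : Option String × Option String × Option String) (p : Int × String) :
    Option String × Option String × Option String :=
  let i := p.1
  let word := p.2
  let c := if s.1 = none ∧ word = "called" ∧ i + 1 < n then
             some (PySem.List.pyGetD words (i + 1) "") else s.1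
  let b := if s.2.1 = none ∧ word = "bucket" ∧ i + 1 < n ∧
              PySem.List.pyGetD words (i + 1) "" ≠ "called" then
             some (PySem.List.pyGetD words (i + 1) "") else s.2.1
  let h := if s.2.2 = none ∧ PySem.Str.isIn "-" word = true ∧ PySem.Str.len word > 10 then
             some word else s.2.2
  (c, b, h)

def extract_bucket_name_alt (request : String) : Option String :=
  let words := PySem.Str.split₀ request
  let n := PySem.List.len words
  let st := (PySem.List.enumerate words 0).foldl (pvB_step words n) (none, none, none)
  match st.1 with
  | some w => some w
  | none =>
    match st.2.1 with
    | some w => some w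
    | none => st.2.2

-- ===== PRECONDITION & SPEC =====
def Spec_extract_bucket_name (request : String) (out : Option String) : Prop := out = extract_bucket_name_alt request
instance (request : String) (out : Option String) : Decidable (Spec_extract_bucket_name request out) := by unfold Spec_extract_bucket_name; infer_instance

-- ===== CLAIM (what is proved, stated in full; the proofs are below) =====
def Claim_equal_extract_bucket_name : Prop := ∀ (request : String), Dom_extract_bucket_name request → Spec_extract_bucket_name request (extract_bucket_name request)

-- ===== LEMMAS AND PROOFS =====

-- first-match views of the three candidate searches
def pvFindC (words : List String) (n : Int) : List (Int × String) → Option String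
  | [] => none
  | p :: rest =>
    if p.2 = "called" ∧ p.1 + 1 < n then some (PySem.List.pyGetD words (p.1 + 1) "")
    else pvFindC words n rest

def pvFindB (words : List String) (n : Int) : List (Int × String) → Option String
  | [] => none
  | p :: rest =>
    if p.2 = "bucket" ∧ p.1 + 1 < n ∧ PySem.List.pyGetD words (p.1 + 1) "" ≠ "called" then
      some (PySem.List.pyGetD words (p.1 + 1) "")
    else pvFindB words n rest

def pvFindH : List (Int × String) → Option String
  | [] => none
  | p :: rest =>
    if PySem.Str.isIn "-" p.2 = true ∧ PySem.Str.len p.2 > 10 then some p.2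
    else pvFindH rest

def pvOr {α : Type} : Option α → Option α → Option α
  | some x, _ => some x
  | none, y => y

theorem pvB_fold_eq (words : List String) (n : Int) (l : List (Int × String)) :
    ∀ c b h, l.foldl (pvB_step words n) (c, b, h) =
      (pvOr c (pvFindC words n l), pvOr b (pvFindB words n l), pvOr h (pvFindH l)) := by
  induction l with
  | nil => intro c b h; cases c <;> cases b <;> cases h <;> simp [pvOr, pvFindC, pvFindB, pvFindH]
  | cons p rest ih =>
    intro c b h
    simp only [List.foldl_cons, pvB_step, ih]
    cases c <;> cases b <;> cases h <;>
      simp [pvFindC, pvFindB, pvFindH, pvOr] <;> split_ifs <;> simp_all [pvOr]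

theorem pvFindB_eq_bucketLoop (words : List String) (l : List (Int × String)) :
    pvFindB words (PySem.List.len words) l = pvA_bucketLoop words l := by
  induction l with
  | nil => rfl
  | cons p rest ih =>
    obtain ⟨i, word⟩ := p
    simp only [pvFindB, pvA_bucketLoop]
    by_cases hg : word = "bucket" ∧ i + 1 < PySem.List.len words
    · rw [if_pos hg]
      by_cases hn : PySem.List.pyGetD words (i + 1) "" ≠ "called"
      · rw [if_pos ⟨hg.1, hg.2, hn⟩, if_pos hn]
      · rw [if_neg (by tauto), if_neg hn, ih]
    · rw [if_neg hg, if_neg (by tauto), ih]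

theorem pvFindH_eq_hyphenLoop (s : List String) (k : Int) :
    pvFindH (PySem.List.enumerate s k) = pvA_hyphenLoop s := by
  induction s generalizing k with
  | nil => rfl
  | cons w rest ih =>
    simp only [PySem.List.enumerate_cons, pvFindH, pvA_hyphenLoop]
    split_ifs <;> simp [ih]

theorem pvFindC_append (words : List String) (n : Int) (l1 l2 : List (Int × String)) :
    pvFindC words n (l1 ++ l2) = pvOr (pvFindC words n l1) (pvFindC words n l2) := by
  induction l1 with
  | nil => simp [pvFindC, pvOr]
  | cons p rest ih => simp only [List.cons_append, pvFindC]; split_ifs <;> simp [pvOr, ih]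

theorem pvFindC_none (words : List String) (n : Int) (l : List (Int × String))
    (h : ∀ p ∈ l, ¬(p.2 = "called" ∧ p.1 + 1 < n)) : pvFindC words n l = none := by
  induction l with
  | nil => rfl
  | cons p rest ih =>
    simp only [pvFindC]
    rw [if_neg (h p (by simp))]
    exact ih (fun q hq => h q (by simp [hq]))

theorem pvOr_none_left {α : Type} (y : Option α) : pvOr none y = y := rfl

theorem pvFindC_split (ws pre suf : List String)
    (hsplit : ws = pre ++ "called" :: suf)
    (hpre : ∀ p ∈ PySem.List.enumerate pre 0, p.2 ≠ "called") :
    pvFindC ws (PySem.List.len ws) (PySem.List.enumerate ws 0) =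
      if (pre.length : Int) + 1 < PySem.List.len ws then
        some (PySem.List.pyGetD ws ((pre.length : Int) + 1) "") else none := by
  have henum : PySem.List.enumerate ws 0 =
      PySem.List.enumerate pre 0 ++ (((pre.length : Int), "called") ::
        PySem.List.enumerate suf ((pre.length : Int) + 1)) := by
    rw [hsplit, PySem.List.enumerate_append, PySem.List.enumerate_cons]
    norm_num
  rw [henum, pvFindC_append,
      pvFindC_none ws _ _ (fun p hp hc => hpre p hp hc.1), pvOr_none_left]
  simp only [pvFindC]
  by_cases hg : (pre.length : Int) + 1 < PySem.List.len ws
  · rw [if_pos ⟨trivial, hg⟩, if_pos hg]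
  · rw [if_neg (fun hh => hg hh.2), if_neg hg]
    have hsuf : suf = [] := by
      rw [PySem.List.len_eq, hsplit] at hg
      simp only [List.length_append, List.length_cons] at hg
      have : suf.length = 0 := by push_cast at hg; omega
      exact List.eq_nil_of_length_eq_zero this
    rw [hsuf]
    rfl

theorem pvFindC_enum_none (ws : List String) (h : "called" ∉ ws) :
    pvFindC ws (PySem.List.len ws) (PySem.List.enumerate ws 0) = none := by
  apply pvFindC_none
  intro p hp hc
  rw [PySem.List.mem_enumerate_iff] at hp
  obtain ⟨k, hk, rfl⟩ := hp
  exact h (hc.1 ▸ List.getElem_mem hk)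

theorem extract_bucket_name_spec : Claim_equal_extract_bucket_name := by
  intro request _
  show extract_bucket_name request = extract_bucket_name_alt request
  simp only [extract_bucket_name, extract_bucket_name_alt]
  rw [pvB_fold_eq]
  simp only [pvOr_none_left]
  rw [pvFindB_eq_bucketLoop, pvFindH_eq_hyphenLoop]
  cases hidx : PySem.List.index? (PySem.Str.split₀ request) "called" with
  | none =>
    have hmem : "called" ∉ PySem.Str.split₀ request :=
      (PySem.List.index?_eq_none_iff _ _).mp hidx
    rw [if_neg hmem, pvFindC_enum_none _ hmem]
  | some ci =>
    have hmem : "called" ∈ PySem.Str.split₀ request := by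
      rw [← PySem.List.index?_isSome_iff (xs := PySem.Str.split₀ request) (v := "called"), hidx]
      rfl
    rw [if_pos hmem]
    obtain ⟨pre, suf, hsplit, hlen, hnot⟩ :=
      (PySem.List.index?_eq_some_iff _ _ _).mp hidx
    subst hlen
    have hpre : ∀ p ∈ PySem.List.enumerate pre 0, p.2 ≠ "called" := by
      intro p hp hc
      rw [PySem.List.mem_enumerate_iff] at hp
      obtain ⟨k, hk, rfl⟩ := hp
      exact hnot (hc ▸ List.getElem_mem hk)
    rw [pvFindC_split _ pre suf hsplit hpre]
    by_cases hg : (pre.length : Int) + 1 < PySem.List.len (PySem.Str.split₀ request)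
    · simp only [hg, if_true]
    · simp only [hg, if_false]
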